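-- pv_equiv track=rewrite | github.com/konszymanski/leetcode-dataset | obfuscated_solutions/python/0014-longest-common-prefix/solution_4_l0_l2_l3.py | isCommonPrefix
-- ===== SOURCE A (Python) =====
-- def isCommonPrefix(strs, l):
--     if 1 + 1 == 2:
--         str1 = strs[0][:l]
--     for i in range(1, len(strs)):
--         v_junk_68 = 69
--         if not strs[i].startswith(str1):
--             return False
--     return True
-- ===== SOURCE B (Python) =====
-- def isCommonPrefix(strs, l):
--     p = strs[0][:l]
--     rest = strs[1:]
--     for j in range(len(p)):
--         c = p[j]
--         for s in rest:
--             if j >= len(s) or s[j] != c: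
--                 return False
--     return True
-- ===== Notes on version B (the rewrite author's own statement) =====
-- stated objective: alternative
-- what changed: Replaces the row-wise startswith scan over the strings with a column-by-column vertical scan: the outer loop runs over character positions of the prefix and the inner loop checks that position in every other string, with an explicit bounds check instead of startswith.
import Mathlib
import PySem

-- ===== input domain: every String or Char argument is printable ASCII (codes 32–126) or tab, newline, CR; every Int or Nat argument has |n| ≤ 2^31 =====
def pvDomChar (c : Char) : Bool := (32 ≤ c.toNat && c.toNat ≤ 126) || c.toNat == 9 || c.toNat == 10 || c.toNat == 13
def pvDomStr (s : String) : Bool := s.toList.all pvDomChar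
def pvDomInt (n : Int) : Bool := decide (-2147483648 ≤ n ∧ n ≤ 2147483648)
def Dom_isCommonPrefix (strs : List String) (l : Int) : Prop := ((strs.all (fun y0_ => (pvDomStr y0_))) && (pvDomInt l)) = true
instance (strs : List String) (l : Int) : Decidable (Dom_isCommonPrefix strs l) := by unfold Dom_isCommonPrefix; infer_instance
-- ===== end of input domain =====

-- B replaces A's row-wise startswith scan by a column-by-column scan over prefix positions; alternative decomposition, same cost.


-- ===== PORT A =====
-- loop 'for i in range(1, len(strs)): if not strs[i].startswith(str1): return False'
def pvLoopA (strs : List String) (str1 : String) : List Int → Bool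
  | [] => true
  | i :: rest =>
    if ¬ (PySem.Str.startswith (PySem.List.pyGetD strs i "") str1) then false
    else pvLoopA strs str1 rest

def isCommonPrefix (strs : List String) (l : Int) : Bool :=
  let str1 := PySem.Str.slice (PySem.List.pyGetD strs 0 "") none (some l)
  pvLoopA strs str1 (PySem.List.pyRange 1 strs.length 1)

-- ===== PORT B =====
-- inner loop 'for s in rest: if j >= len(s) or s[j] != c: return False'
def pvColOk (j : Nat) (c : Char) : List (List Char) → Bool
  | [] => true
  | s :: ss =>
    if h : j < s.length then (if s[j] = c then pvColOk j c ss else false)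
    else false

-- outer loop 'for j in range(len(p)): c = p[j]; …'
def pvCols (rest : List (List Char)) : List Char → Nat → Bool
  | [], _ => true
  | c :: cs, j => if pvColOk j c rest then pvCols rest cs (j + 1) else false

def isCommonPrefix_alt (strs : List String) (l : Int) : Bool :=
  let p := (PySem.Str.slice (PySem.List.pyGetD strs 0 "") none (some l)).toList
  pvCols (strs.tail.map String.toList) p 0

-- ===== PRECONDITION & SPEC =====
-- A raises IndexError on the empty list (strs[0]); excluded.
def Pre_isCommonPrefix (strs : List String) (l : Int) : Prop := strs ≠ []
instance (strs : List String) (l : Int) : Decidable (Pre_isCommonPrefix strs l) := by unfold Pre_isCommonPrefix; infer_instance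
def pvWitness_isCommonPrefix : List String × Int := (["abc", "abd"], 2)

def Spec_isCommonPrefix (strs : List String) (l : Int) (out : Bool) : Prop := out = isCommonPrefix_alt strs l
instance (strs : List String) (l : Int) (out : Bool) : Decidable (Spec_isCommonPrefix strs l out) := by unfold Spec_isCommonPrefix; infer_instance

-- ===== CLAIM (what is proved, stated in full; the proofs are below) =====
def Claim_equal_isCommonPrefix : Prop := ∀ (strs : List String) (l : Int), Dom_isCommonPrefix strs l → Pre_isCommonPrefix strs l → Spec_isCommonPrefix strs l (isCommonPrefix strs l)

-- ===== LEMMAS AND PROOFS =====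

-- A's index loop over range(1, len strs) is an 'all startswith' over the tail.
theorem pvLoopA_eq (pre xs : List String) (str1 : String) :
    pvLoopA (pre ++ xs) str1
      (PySem.List.pyRange (pre.length : Int) (((pre.length + xs.length : Nat) : Int)) 1)
      = xs.all (fun s => PySem.Str.startswith s str1) := by
  induction xs generalizing pre with
  | nil => simp [pvLoopA, PySem.List.pyRange]
  | cons x xs ih =>
    rw [PySem.List.pyRange_one_cons (by push_cast [List.length_cons]; omega)]
    have hget : PySem.List.pyGetD (pre ++ x :: xs) (pre.length : Int) "" = x := by
      simp [PySem.List.pyGetD_natCast]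
    have hstep : pvLoopA (pre ++ x :: xs) str1
        (PySem.List.pyRange ((pre.length : Int) + 1) (((pre.length + (x :: xs).length : Nat) : Int)) 1)
        = xs.all (fun s => PySem.Str.startswith s str1) := by
      have h1 : ((pre.length : Int) + 1) = (((pre ++ [x]).length : Nat) : Int) := by
        push_cast [List.length_append, List.length_cons, List.length_nil]; omega
      have h2 : (((pre.length + (x :: xs).length : Nat) : Int)) = ((((pre ++ [x]).length + xs.length : Nat) : Int)) := by
        push_cast [List.length_append, List.length_cons, List.length_nil]; omega
      have h3 : pre ++ x :: xs = (pre ++ [x]) ++ xs := by simp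
      rw [h1, h2, h3]
      exact ih (pre ++ [x])
    simp only [pvLoopA, hget, hstep, List.all_cons]
    by_cases hs : PySem.Str.startswith x str1 <;> simp [hs]

theorem pvColOk_eq (j : Nat) (c : Char) (rest : List (List Char)) :
    pvColOk j c rest = rest.all (fun s => s[j]? == some c) := by
  induction rest with
  | nil => rfl
  | cons s ss ih =>
    simp only [pvColOk, List.all_cons]
    by_cases h : j < s.length
    · simp only [dif_pos h, List.getElem?_eq_getElem h]
      by_cases hc : s[j] = c
      · simp [hc, ih]
      · simp [hc]
    · rw [dif_neg h, List.getElem?_eq_none (show s.length ≤ j by omega)]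
      simp

theorem prefix_drop_cons (c : Char) (cs s : List Char) (j : Nat) :
    (c :: cs <+: s.drop j) ↔ (s[j]? = some c ∧ cs <+: s.drop (j + 1)) := by
  by_cases h : j < s.length
  · rw [List.drop_eq_getElem_cons h, List.cons_prefix_cons, List.getElem?_eq_getElem h]
    simp [eq_comm]
  · rw [List.drop_eq_nil_of_le (by omega), List.getElem?_eq_none (by omega)]
    simp

-- B's column scan checks, column by column, that the prefix matches each string from position j on.
theorem pvCols_eq (rest : List (List Char)) (cs : List Char) (j : Nat) :
    pvCols rest cs j = rest.all (fun s => decide (cs <+: s.drop j)) := by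
  induction cs generalizing j with
  | nil => simp [pvCols]
  | cons c cs ih =>
    simp only [pvCols, pvColOk_eq, ih]
    by_cases h : (rest.all fun s => s[j]? == some c) = true
    · rw [if_pos h]
      rw [Bool.eq_iff_iff, List.all_eq_true, List.all_eq_true]
      refine forall_congr' fun s => forall_congr' fun hs => ?_
      have hsj : s[j]? = some c := by simpa using (List.all_eq_true.mp h) s hs
      simp [prefix_drop_cons, hsj]
    · rw [if_neg h, Bool.not_eq_true] at *
      obtain ⟨s, hs, hne⟩ := List.all_eq_false.mp h
      have hne' : s[j]? ≠ some c := by simpa using hne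
      symm
      rw [List.all_eq_false]
      refine ⟨s, hs, ?_⟩
      simp only [decide_eq_true_eq, prefix_drop_cons]
      exact fun ⟨h1, _⟩ => hne' h1

-- ===== VERDICT (by name: the statement is the Claim_ definition above) =====
theorem isCommonPrefix_spec : Claim_equal_isCommonPrefix := by
  intro strs l _ hpre
  unfold Spec_isCommonPrefix isCommonPrefix isCommonPrefix_alt
  obtain ⟨x, xs, rfl⟩ : ∃ x xs, strs = x :: xs := by
    cases strs with
    | nil => exact absurd rfl hpre
    | cons x xs => exact ⟨x, xs, rfl⟩
  have hA := pvLoopA_eq [x] xs (PySem.Str.slice (PySem.List.pyGetD (x :: xs) 0 "") none (some l))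
  have hlen : ((([x] : List String).length + xs.length : Nat) : Int) = (((x :: xs).length : Nat) : Int) := by
    simp [Nat.add_comm]
  rw [List.singleton_append, hlen] at hA
  simp only [List.length_cons, List.length_nil] at hA ⊢
  rw [show ((1 : Nat) : Int) = (1 : Int) by norm_num] at hA
  rw [hA, List.tail_cons, pvCols_eq]
  simp only [List.all_map, List.drop_zero]
  rw [Bool.eq_iff_iff, List.all_eq_true, List.all_eq_true]
  refine forall_congr' fun s => forall_congr' fun hs => ?_
  rw [PySem.Str.startswith_eq]
  simp [PySem.Chars.startswith_iff]
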